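-- pv_equiv track=rewrite | github.com/ceciljoseph97/uavDRL | tb_logs/tbCheck.py | get_abbreviation
-- ===== SOURCE A (Python) =====
-- abbreviations = {
--     "a2c_naturecnn_depth_obstacle_weather_leavesfalling": "A2C-DL",
--     "a2c_naturecnn_depth_obstacle_weather_rainandfog": "A2C-DRF",
--     "a2c_naturecnn_depth_obstacle_weather_snowonly": "A2C-DS",
--     "a2c_naturecnn_depth": "A2C-D",
--     "a2c_naturecnn_multi_rgb_obstacle_weather_off": "A2C-MRGB",
--     "a2c_naturecnn_single_rgb_obstacle_weather_leavesfalling": "A2C-SRGBL",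
--     "a2c_naturecnn_single_rgb_obstacle_weather_rainandfog": "A2C-SRGBRF",
--     "a2c_naturecnn_single_rgb_obstacle_weather_snowonly": "A2C-SRGBS",
--     "a2c_naturecnn_single_rgb": "A2C-SRGB",
--     "ppo_naturecnn_depth_obstacle_weather_clr_snw_rnf_lvf": "PPO-DFM",
--     "ppo_naturecnn_depth_obstacle_weather_leavesfalling": "PPO-DL",
--     "ppo_naturecnn_depth_obstacle_weather_rainandfog": "PPO-DRF",
--     "ppo_naturecnn_depth_obstacle_weather_snowonly": "PPO-DS",
--     "ppo_naturecnn_depth": "PPO-D",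
--     "ppo_naturecnn_multi_rgb": "PPO-MRGB",
--     "ppo_naturecnn_single_rgb_obstacle_weather_clr_snw_rnf_lvf": "PPO-SRGBFM",
--     "ppo_naturecnn_single_rgb_obstacle_weather_leavesfalling": "PPO-SRGBL",
--     "ppo_naturecnn_single_rgb_obstacle_weather_rainandfog": "PPO-SRGBRF",
--     "ppo_naturecnn_single_rgb_obstacle_weather_snowonly": "PPO-SRGBS",
--     "ppo_naturecnn_single_rgb": "PPO-SRGB"
-- }
--
-- def get_abbreviation(folder_name):
--     folder_name = folder_name.strip().lower()
--     prefix = "tb_logs_"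
--     if folder_name.startswith(prefix):
--         folder_name = folder_name[len(prefix):]
--
--     for key, abbr in sorted(abbreviations.items(), key=lambda x: len(x[0]), reverse=True):
--         if folder_name.startswith(key):
--             return abbr
--     return folder_name
-- ===== SOURCE B (Python) =====
-- # The abbreviation table, stored structurally: (algo, sensor, optional weather, abbr).
-- # The flat key of each row is algo + "_naturecnn_" + sensor [+ "_obstacle_weather_" + weather].
-- _ROWS = [
--     ("a2c", "depth", "leavesfalling", "A2C-DL"),
--     ("a2c", "depth", "rainandfog", "A2C-DRF"),
--     ("a2c", "depth", "snowonly", "A2C-DS"),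
--     ("a2c", "depth", None, "A2C-D"),
--     ("a2c", "multi_rgb", "off", "A2C-MRGB"),
--     ("a2c", "single_rgb", "leavesfalling", "A2C-SRGBL"),
--     ("a2c", "single_rgb", "rainandfog", "A2C-SRGBRF"),
--     ("a2c", "single_rgb", "snowonly", "A2C-SRGBS"),
--     ("a2c", "single_rgb", None, "A2C-SRGB"),
--     ("ppo", "depth", "clr_snw_rnf_lvf", "PPO-DFM"),
--     ("ppo", "depth", "leavesfalling", "PPO-DL"),
--     ("ppo", "depth", "rainandfog", "PPO-DRF"),
--     ("ppo", "depth", "snowonly", "PPO-DS"),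
--     ("ppo", "depth", None, "PPO-D"),
--     ("ppo", "multi_rgb", None, "PPO-MRGB"),
--     ("ppo", "single_rgb", "clr_snw_rnf_lvf", "PPO-SRGBFM"),
--     ("ppo", "single_rgb", "leavesfalling", "PPO-SRGBL"),
--     ("ppo", "single_rgb", "rainandfog", "PPO-SRGBRF"),
--     ("ppo", "single_rgb", "snowonly", "PPO-SRGBS"),
--     ("ppo", "single_rgb", None, "PPO-SRGB"),
-- ]
--
-- def _key(algo, sensor, weather):
--     parts = [algo, "_naturecnn_", sensor]
--     if weather is not None:
--         parts += ["_obstacle_weather_", weather]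
--     return "".join(parts)
--
-- _ABBR = {_key(a, s, w): abbr for a, s, w, abbr in _ROWS}
--
-- _MAXKEY = max(map(len, _ABBR), default=0)
--
-- def get_abbreviation(folder_name):
--     fn = folder_name.strip().lower()
--     if fn.startswith("tb_logs_"):
--         fn = fn[8:]
--     # longest-prefix match by trying every prefix of fn as a key, longest first
--     for L in range(min(len(fn), _MAXKEY), 0, -1):
--         abbr = _ABBR.get(fn[:L])
--         if abbr is not None:
--             return abbr
--     return fn
-- ===== Notes on version B (the rewrite author's own statement) =====
-- stated objective: alternative
-- what changed: stores the table structurally as (algo, sensor, weather) rows whose flat keys are rebuilt by join into a dict, and finds the longest-prefix match by probing each prefix of the normalized name (capped at the longest key length) as a dict key, longest first, instead of sorting the dict by key length and scanning for the first key that prefixes the name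
import Mathlib
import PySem

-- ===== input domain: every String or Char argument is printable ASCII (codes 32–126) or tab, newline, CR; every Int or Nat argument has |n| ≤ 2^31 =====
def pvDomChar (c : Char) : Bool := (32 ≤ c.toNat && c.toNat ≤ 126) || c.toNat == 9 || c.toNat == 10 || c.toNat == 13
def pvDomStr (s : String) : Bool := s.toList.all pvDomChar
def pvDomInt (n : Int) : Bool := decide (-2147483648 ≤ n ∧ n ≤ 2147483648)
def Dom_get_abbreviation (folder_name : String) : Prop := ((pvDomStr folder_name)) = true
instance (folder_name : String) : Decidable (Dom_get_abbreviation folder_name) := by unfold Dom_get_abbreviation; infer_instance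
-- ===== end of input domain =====

-- B stores the table as structured (algo, sensor, weather) rows whose flat keys are rebuilt into a dict,
-- and finds the longest-prefix match by probing each prefix of the normalized name as a dict key, longest first
-- (instead of A's sort-by-key-length-then-scan-for-first-prefix). Objective: alternative.

-- ===== PORT A =====
def abbreviations : PySem.Dict String String := PySem.Dict.ofList [
  ("a2c_naturecnn_depth_obstacle_weather_leavesfalling", "A2C-DL"),
  ("a2c_naturecnn_depth_obstacle_weather_rainandfog", "A2C-DRF"),
  ("a2c_naturecnn_depth_obstacle_weather_snowonly", "A2C-DS"),
  ("a2c_naturecnn_depth", "A2C-D"),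
  ("a2c_naturecnn_multi_rgb_obstacle_weather_off", "A2C-MRGB"),
  ("a2c_naturecnn_single_rgb_obstacle_weather_leavesfalling", "A2C-SRGBL"),
  ("a2c_naturecnn_single_rgb_obstacle_weather_rainandfog", "A2C-SRGBRF"),
  ("a2c_naturecnn_single_rgb_obstacle_weather_snowonly", "A2C-SRGBS"),
  ("a2c_naturecnn_single_rgb", "A2C-SRGB"),
  ("ppo_naturecnn_depth_obstacle_weather_clr_snw_rnf_lvf", "PPO-DFM"),
  ("ppo_naturecnn_depth_obstacle_weather_leavesfalling", "PPO-DL"),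
  ("ppo_naturecnn_depth_obstacle_weather_rainandfog", "PPO-DRF"),
  ("ppo_naturecnn_depth_obstacle_weather_snowonly", "PPO-DS"),
  ("ppo_naturecnn_depth", "PPO-D"),
  ("ppo_naturecnn_multi_rgb", "PPO-MRGB"),
  ("ppo_naturecnn_single_rgb_obstacle_weather_clr_snw_rnf_lvf", "PPO-SRGBFM"),
  ("ppo_naturecnn_single_rgb_obstacle_weather_leavesfalling", "PPO-SRGBL"),
  ("ppo_naturecnn_single_rgb_obstacle_weather_rainandfog", "PPO-SRGBRF"),
  ("ppo_naturecnn_single_rgb_obstacle_weather_snowonly", "PPO-SRGBS"),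
  ("ppo_naturecnn_single_rgb", "PPO-SRGB")]

-- A's for-loop with early 'return abbr' and fall-through 'return folder_name'
def pvLoopA (fn : String) : List (String × String) → String
  | [] => fn
  | kv :: rest => if PySem.Str.startswith fn kv.1 then kv.2 else pvLoopA fn rest

def get_abbreviation (folder_name : String) : String :=
  -- folder_name = folder_name.strip().lower(); drop a leading "tb_logs_"
  let fn0 := PySem.Str.lower (PySem.Str.strip folder_name)
  let fn := if PySem.Str.startswith fn0 "tb_logs_"
            then PySem.Str.slice fn0 (some (PySem.Str.len "tb_logs_")) none else fn0
  pvLoopA fn (PySem.List.sorted (PySem.Dict.items abbreviations) (fun x => PySem.Str.len x.1) true)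

-- ===== PORT B =====
-- the structured rows of Source B: (algo, sensor, optional weather, abbr)
def pvRows : List (String × String × Option String × String) := [
  ("a2c", "depth", some "leavesfalling", "A2C-DL"),
  ("a2c", "depth", some "rainandfog", "A2C-DRF"),
  ("a2c", "depth", some "snowonly", "A2C-DS"),
  ("a2c", "depth", none, "A2C-D"),
  ("a2c", "multi_rgb", some "off", "A2C-MRGB"),
  ("a2c", "single_rgb", some "leavesfalling", "A2C-SRGBL"),
  ("a2c", "single_rgb", some "rainandfog", "A2C-SRGBRF"),
  ("a2c", "single_rgb", some "snowonly", "A2C-SRGBS"),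
  ("a2c", "single_rgb", none, "A2C-SRGB"),
  ("ppo", "depth", some "clr_snw_rnf_lvf", "PPO-DFM"),
  ("ppo", "depth", some "leavesfalling", "PPO-DL"),
  ("ppo", "depth", some "rainandfog", "PPO-DRF"),
  ("ppo", "depth", some "snowonly", "PPO-DS"),
  ("ppo", "depth", none, "PPO-D"),
  ("ppo", "multi_rgb", none, "PPO-MRGB"),
  ("ppo", "single_rgb", some "clr_snw_rnf_lvf", "PPO-SRGBFM"),
  ("ppo", "single_rgb", some "leavesfalling", "PPO-SRGBL"),
  ("ppo", "single_rgb", some "rainandfog", "PPO-SRGBRF"),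
  ("ppo", "single_rgb", some "snowonly", "PPO-SRGBS"),
  ("ppo", "single_rgb", none, "PPO-SRGB")]

-- _key: "".join([algo, "_naturecnn_", sensor] (+ ["_obstacle_weather_", weather]))
def pvKey (algo sensor : String) (weather : Option String) : String :=
  PySem.Str.join "" (match weather with
    | none => [algo, "_naturecnn_", sensor]
    | some w => [algo, "_naturecnn_", sensor, "_obstacle_weather_", w])

-- _ABBR = {_key(a, s, w): abbr for a, s, w, abbr in _ROWS}
def pvAbbrDict : PySem.Dict String String :=
  PySem.Dict.ofList (pvRows.map (fun r => (pvKey r.1 r.2.1 r.2.2.1, r.2.2.2)))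

-- _MAXKEY = max(map(len, _ABBR), default=0)
def pvMaxKey : Int := PySem.List.maxD ((PySem.Dict.keys pvAbbrDict).map PySem.Str.len) id 0

-- for L in range(min(len(fn), _MAXKEY), 0, -1): probe fn[:L] as a dict key
def pvProbe (fn : String) : Nat → String
  | 0 => fn
  | Nat.succ L =>
      match PySem.Dict.get? pvAbbrDict (PySem.Str.slice fn none (some ((L : Int) + 1))) with
      | some abbr => abbr
      | none => pvProbe fn L

def get_abbreviation_alt (folder_name : String) : String :=
  let fn0 := PySem.Str.lower (PySem.Str.strip folder_name)
  let fn := if PySem.Str.startswith fn0 "tb_logs_"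
            then PySem.Str.slice fn0 (some 8) none else fn0
  pvProbe fn (min (PySem.Str.len fn) pvMaxKey).toNat

-- ===== PRECONDITION & SPEC =====
def Spec_get_abbreviation (folder_name : String) (out : String) : Prop := out = get_abbreviation_alt folder_name
instance (folder_name : String) (out : String) : Decidable (Spec_get_abbreviation folder_name out) := by unfold Spec_get_abbreviation; infer_instance

-- ===== CLAIM (what is proved, stated in full; the proofs are below) =====
def Claim_equal_get_abbreviation : Prop := ∀ (folder_name : String), Dom_get_abbreviation folder_name → Spec_get_abbreviation folder_name (get_abbreviation folder_name)

-- ===== LEMMAS AND PROOFS =====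

-- the (unique) longest entry of the list whose key prefixes fn, earlier entries winning ties
def pvCombine (kv : String × String) : Option (String × String) → Option (String × String)
  | none => some kv
  | some kv' => if PySem.Str.len kv.1 < PySem.Str.len kv'.1 then some kv' else some kv

def pvBest? (fn : String) : List (String × String) → Option (String × String)
  | [] => none
  | kv :: rest =>
    if PySem.Str.startswith fn kv.1 then pvCombine kv (pvBest? fn rest) else pvBest? fn rest

theorem pvBest?_mem {fn : String} {l : List (String × String)} {kv : String × String}
    (h : pvBest? fn l = some kv) : kv ∈ l := by
  induction l with
  | nil => simp [pvBest?] at h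
  | cons hd tl ih =>
    simp only [pvBest?] at h
    split_ifs at h with hs
    · rcases htl : pvBest? fn tl with _ | kv' <;> rw [htl] at h <;>
        simp only [pvCombine] at h
      · obtain rfl := Option.some.inj h
        exact List.mem_cons_self
      · split_ifs at h
        · obtain rfl := Option.some.inj h
          exact List.mem_cons_of_mem _ (ih htl)
        · obtain rfl := Option.some.inj h
          exact List.mem_cons_self
    · exact List.mem_cons_of_mem _ (ih h)

theorem pvBest?_match {fn : String} {l : List (String × String)} {kv : String × String}
    (h : pvBest? fn l = some kv) : PySem.Str.startswith fn kv.1 = true := by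
  induction l with
  | nil => simp [pvBest?] at h
  | cons hd tl ih =>
    simp only [pvBest?] at h
    split_ifs at h with hs
    · rcases htl : pvBest? fn tl with _ | kv' <;> rw [htl] at h <;>
        simp only [pvCombine] at h
      · obtain rfl := Option.some.inj h
        exact hs
      · split_ifs at h
        · obtain rfl := Option.some.inj h
          exact ih htl
        · obtain rfl := Option.some.inj h
          exact hs
    · exact ih h

theorem pvBest?_none_iff {fn : String} {l : List (String × String)} :
    pvBest? fn l = none ↔ ∀ kv ∈ l, PySem.Str.startswith fn kv.1 = false := by
  induction l with
  | nil => simp [pvBest?]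
  | cons hd tl ih =>
    simp only [pvBest?]
    constructor
    · intro h kv hkv
      split_ifs at h with hs
      · rcases htl : pvBest? fn tl with _ | kv' <;> rw [htl] at h <;>
          simp only [pvCombine] at h
        · exact absurd h (by simp)
        · split_ifs at h
      · rcases List.mem_cons.mp hkv with h1 | h2
        · subst h1; simpa using hs
        · exact (ih.mp h) kv h2
    · intro h
      have hhd := h hd List.mem_cons_self
      have htl : pvBest? fn tl = none := ih.mpr (fun kv hkv => h kv (List.mem_cons_of_mem _ hkv))
      rw [htl, if_neg (by simp only [PySem.Str.startswith_eq] at hhd ⊢; simp [hhd])]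

theorem pvBest?_maximal {fn : String} {l : List (String × String)} {kv : String × String}
    (h : pvBest? fn l = some kv) :
    ∀ kv' ∈ l, PySem.Str.startswith fn kv'.1 = true → PySem.Str.len kv'.1 ≤ PySem.Str.len kv.1 := by
  induction l generalizing kv with
  | nil => simp [pvBest?] at h
  | cons hd tl ih =>
    intro p hp hm
    simp only [pvBest?] at h
    split_ifs at h with hs
    · rcases htl : pvBest? fn tl with _ | kvb <;> rw [htl] at h <;>
        simp only [pvCombine] at h
      · obtain rfl := Option.some.inj h
        rcases List.mem_cons.mp hp with h1 | h2
        · subst h1; omega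
        · have hf := (pvBest?_none_iff.mp htl) p h2
          rw [hf] at hm; cases hm
      · split_ifs at h with hlt
        · obtain rfl := Option.some.inj h
          rcases List.mem_cons.mp hp with h1 | h2
          · subst h1; omega
          · exact ih htl p h2 hm
        · obtain rfl := Option.some.inj h
          rcases List.mem_cons.mp hp with h1 | h2
          · subst h1; omega
          · have := ih htl p h2 hm; omega
    · rcases List.mem_cons.mp hp with h1 | h2
      · subst h1; simp_all
      · exact ih h p h2 hm

-- A's loop on a length-descending list returns pvBest?'s abbreviation
theorem pvLoopA_eq (fn : String) (l : List (String × String))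
    (hp : l.Pairwise (fun a b => PySem.Str.len b.1 ≤ PySem.Str.len a.1)) :
    pvLoopA fn l = (match pvBest? fn l with | none => fn | some kv => kv.2) := by
  induction l with
  | nil => simp [pvLoopA, pvBest?]
  | cons hd tl ih =>
    rcases List.pairwise_cons.mp hp with ⟨hhd, htlp⟩
    simp only [pvLoopA, pvBest?]
    by_cases hs : PySem.Str.startswith fn hd.1 = true
    · rw [if_pos hs]
      rcases htl : pvBest? fn tl with _ | kv' <;> rw [if_pos hs]
      · simp [pvCombine]
      · have hmem := pvBest?_mem htl
        have hle : ¬ PySem.Str.len hd.1 < PySem.Str.len kv'.1 := by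
          have := hhd kv' hmem; omega
        simp only [pvCombine]
        rw [if_neg hle]
    · rw [if_neg hs, if_neg hs]
      exact ih htlp

-- two strings prefixing the same string with equal length are equal
theorem pvPrefix_eq {fn a b : String}
    (ha : PySem.Str.startswith fn a = true) (hb : PySem.Str.startswith fn b = true)
    (hl : PySem.Str.len a = PySem.Str.len b) : a = b := by
  simp only [PySem.Str.startswith_eq] at ha hb
  have ha' := (PySem.Chars.startswith_iff _ _).mp ha
  have hb' := (PySem.Chars.startswith_iff _ _).mp hb
  simp only [PySem.Str.len_eq] at hl
  have hlen : a.toList.length = b.toList.length := by exact_mod_cast hl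
  have hpre : a.toList <+: b.toList :=
    List.prefix_of_prefix_length_le ha' hb' (le_of_eq hlen)
  have : a.toList = b.toList := List.IsPrefix.eq_of_length hpre hlen
  have h2 := congrArg String.ofList this
  simpa using h2

-- the dict's keys are pairwise distinct (so an item is determined by its key)
theorem pvKeyInj : ∀ p ∈ PySem.Dict.items abbreviations, ∀ q ∈ PySem.Dict.items abbreviations,
    p.1 = q.1 → p = q := by decide

-- pvBest? is invariant under permutation, given key-injectivity on members
theorem pvBest?_perm {fn : String} {l₁ l₂ : List (String × String)}
    (hperm : l₁.Perm l₂)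
    (hinj : ∀ p ∈ l₁, ∀ q ∈ l₁, PySem.Str.startswith fn p.1 = true →
      PySem.Str.startswith fn q.1 = true → PySem.Str.len p.1 = PySem.Str.len q.1 → p = q) :
    pvBest? fn l₁ = pvBest? fn l₂ := by
  rcases h1 : pvBest? fn l₁ with _ | kv₁ <;> rcases h2 : pvBest? fn l₂ with _ | kv₂
  · rfl
  · have := (pvBest?_none_iff.mp h1) kv₂ (hperm.mem_iff.mpr (pvBest?_mem h2))
    rw [pvBest?_match h2] at this; cases this
  · have := (pvBest?_none_iff.mp h2) kv₁ (hperm.mem_iff.mp (pvBest?_mem h1))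
    rw [pvBest?_match h1] at this; cases this
  · have m1 : kv₁ ∈ l₁ := pvBest?_mem h1
    have m2 : kv₂ ∈ l₁ := hperm.mem_iff.mpr (pvBest?_mem h2)
    have s1 := pvBest?_match h1
    have s2 := pvBest?_match h2
    have le1 := pvBest?_maximal h1 kv₂ m2 s2
    have le2 := pvBest?_maximal h2 kv₁ (hperm.mem_iff.mp m1) s1
    have : kv₁ = kv₂ := hinj kv₁ m1 kv₂ m2 s1 s2 (by omega)
    rw [this]

-- B's rebuilt dict is A's dict
theorem pvDict_eq : pvAbbrDict = abbreviations := by decide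

-- no key of the table is empty
theorem pvKeysPos : ∀ kv ∈ PySem.Dict.items abbreviations, 0 < kv.1.toList.length := by decide

-- the cap really is the longest key length, and every key fits under it
theorem pvMaxKey_val : pvMaxKey = 57 := by decide

theorem pvKeyLen : ∀ kv ∈ PySem.Dict.items abbreviations, kv.1.toList.length ≤ 57 := by decide

-- fn[:L] (0 < L ≤ len fn) as a list, it prefixes fn and has length L
theorem pvSlice_toList (fn : String) (L : Nat) :
    (PySem.Str.slice fn none (some ((L : Int) + 1))).toList = fn.toList.take (L + 1) := by
  have : ((L : Int) + 1) = ((L + 1 : Nat) : Int) := by push_cast; ring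
  rw [PySem.Str.toList_slice, PySem.Chars.slice_eq_listSlice, this,
    PySem.List.slice_to_natCast]

theorem pvSlice_startswith (fn : String) (L : Nat) :
    PySem.Str.startswith fn (PySem.Str.slice fn none (some ((L : Int) + 1))) = true := by
  rw [PySem.Str.startswith_eq]
  exact (PySem.Chars.startswith_iff _ _).mpr (by rw [pvSlice_toList]; exact List.take_prefix _ _)

-- a key that prefixes fn is no longer than fn
theorem pvMatch_le (fn k : String) (h : PySem.Str.startswith fn k = true) :
    k.toList.length ≤ fn.toList.length := by
  rw [PySem.Str.startswith_eq] at h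
  exact ((PySem.Chars.startswith_iff _ _).mp h).length_le

-- definitional unfolding of one probe step
set_option maxRecDepth 8192 in
theorem pvProbe_succ (fn : String) (L : Nat) :
    pvProbe fn (L + 1) =
      (match PySem.Dict.get? pvAbbrDict (PySem.Str.slice fn none (some ((L : Int) + 1))) with
      | some abbr => abbr
      | none => pvProbe fn L) := rfl

-- B's descending probe loop computes the longest-prefix match, given that all
-- matching keys fit below the starting length L ≤ len fn
theorem pvProbe_eq (fn : String) (L : Nat) (hL : L ≤ fn.toList.length)
    (hcover : ∀ kv ∈ PySem.Dict.items abbreviations,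
      PySem.Str.startswith fn kv.1 = true → kv.1.toList.length ≤ L) :
    pvProbe fn L =
      (match pvBest? fn (PySem.Dict.items abbreviations) with | none => fn | some kv => kv.2) := by
  induction L with
  | zero =>
    have hnone : pvBest? fn (PySem.Dict.items abbreviations) = none := by
      rw [pvBest?_none_iff]
      intro kv hkv
      by_cases hs : PySem.Str.startswith fn kv.1 = true
      · have := hcover kv hkv hs
        have := pvKeysPos kv hkv
        omega
      · simpa using hs
    rw [hnone]
    rfl
  | succ L ih =>
    rw [pvProbe_succ, pvDict_eq]
    rcases hget : PySem.Dict.get? abbreviations (PySem.Str.slice fn none (some ((L : Int) + 1))) with _ | a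
    · -- miss: no matching key has length L+1, shrink the cover and recurse
      have hnotmem := (PySem.Dict.get?_eq_none_iff_not_mem_keys _ _).mp hget
      have hcover' : ∀ kv ∈ PySem.Dict.items abbreviations,
          PySem.Str.startswith fn kv.1 = true → kv.1.toList.length ≤ L := by
        intro kv hkv hs
        have hle := hcover kv hkv hs
        by_contra hgt
        have hlen : kv.1.toList.length = L + 1 := by omega
        have : kv.1 = PySem.Str.slice fn none (some ((L : Int) + 1)) := by
          refine pvPrefix_eq hs (pvSlice_startswith fn L) ?_
          simp only [PySem.Str.len_eq]
          rw [hlen, pvSlice_toList, List.length_take]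
          omega
        exact hnotmem (this ▸ PySem.Dict.mem_keys_of_mem_items _ hkv)
      exact ih (by omega) hcover'
    · -- hit: the probed prefix is itself the longest matching key
      have hmem : (PySem.Str.slice fn none (some ((L : Int) + 1)), a) ∈ PySem.Dict.items abbreviations :=
        PySem.Dict.mem_items_of_get?_eq_some _ hget
      have hs := pvSlice_startswith fn L
      rcases hb : pvBest? fn (PySem.Dict.items abbreviations) with _ | kv
      · have hf := (pvBest?_none_iff.mp hb) _ hmem
        rw [hf] at hs
        cases hs
      · have hmax := pvBest?_maximal hb _ hmem hs
        have hcov := hcover kv (pvBest?_mem hb) (pvBest?_match hb)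
        have hplen : (PySem.Str.slice fn none (some ((L : Int) + 1))).toList.length = L + 1 := by
          rw [pvSlice_toList, List.length_take]; omega
        have hkeq : kv.1 = PySem.Str.slice fn none (some ((L : Int) + 1)) := by
          refine pvPrefix_eq (pvBest?_match hb) hs ?_
          simp only [PySem.Str.len_eq, hplen]
          simp only [PySem.Str.len_eq, hplen] at hmax
          omega
        have : kv = (PySem.Str.slice fn none (some ((L : Int) + 1)), a) :=
          pvKeyInj kv (pvBest?_mem hb) _ hmem hkeq
        rw [this]

-- the core equivalence for a fixed normalized name fn
theorem pvMain (fn : String) :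
    pvLoopA fn (PySem.List.sorted (PySem.Dict.items abbreviations) (fun x => PySem.Str.len x.1) true) =
      pvProbe fn (min (PySem.Str.len fn) pvMaxKey).toNat := by
  have hperm : (PySem.List.sorted (PySem.Dict.items abbreviations) (fun x => PySem.Str.len x.1) true).Perm
      (PySem.Dict.items abbreviations) := PySem.List.sorted_perm _ _ _
  have hpair := PySem.List.sorted_pairwise_rev (xs := PySem.Dict.items abbreviations)
      (key := fun x => PySem.Str.len x.1)
  rw [pvLoopA_eq _ _ hpair]
  have hinj : ∀ p ∈ (PySem.List.sorted (PySem.Dict.items abbreviations) (fun x => PySem.Str.len x.1) true),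
      ∀ q ∈ (PySem.List.sorted (PySem.Dict.items abbreviations) (fun x => PySem.Str.len x.1) true),
      PySem.Str.startswith fn p.1 = true → PySem.Str.startswith fn q.1 = true →
      PySem.Str.len p.1 = PySem.Str.len q.1 → p = q := by
    intro p hp q hq hsp hsq hlen
    exact pvKeyInj p (hperm.mem_iff.mp hp) q (hperm.mem_iff.mp hq) (pvPrefix_eq hsp hsq hlen)
  rw [pvBest?_perm hperm hinj]
  rw [pvProbe_eq fn (min (PySem.Str.len fn) pvMaxKey).toNat
    (by simp only [PySem.Str.len_eq, pvMaxKey_val]; omega)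
    (fun kv hkv hs => by
      have h1 := pvMatch_le fn kv.1 hs
      have h2 := pvKeyLen kv hkv
      have h3 : (0:Int) ≤ PySem.Str.len fn := by simp only [PySem.Str.len_eq]; omega
      simp only [PySem.Str.len_eq, pvMaxKey_val] at *
      omega)]

-- A's slice bound len("tb_logs_") is the literal 8 Source B uses
theorem pvLen_tb : PySem.Str.len "tb_logs_" = 8 := by decide

-- ===== VERDICT (by name: the statement is the Claim_ definition above) =====
theorem get_abbreviation_spec : Claim_equal_get_abbreviation := by
  intro s _
  show get_abbreviation s = get_abbreviation_alt s
  unfold get_abbreviation get_abbreviation_alt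
  rw [pvLen_tb]
  exact pvMain _
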